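-- pv_equiv track=rewrite | github.com/JunOnJuly/BaekJoon | 백준/Platinum/13511. 트리와 쿼리 2/트리와 쿼리 2.py | equailze_depth
-- ===== SOURCE A (Python) =====
-- def equailze_depth(node_1, node_2, depth_list, sparse_table):
--     # 노드들의 깊이
--     depth_1 = depth_list[node_1]
--     depth_2 = depth_list[node_2]
--     # 이동 비용
--     move_cost = 0
--     # 깊이 상태, 1, 2 중에 뭐가 깊은지
--     depth_state = 0
--     # 깊이 차이
--     sub_depth = 0
--     # depth_1 이 더 크면
--     if depth_1 > depth_2:
--         # 깊이 상태
--         depth_state = 1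
--         # 깊이 차이
--         sub_depth = depth_1 - depth_2
--         # 깊이 차이 2진수
--         bin_sub_depth = bin(sub_depth)[2:]
--         # 순회하며 노드 이동
--         for idx, n in enumerate(reversed(bin_sub_depth)):
--             # n 이 1 이면
--             if n == '1':
--                 # 이동 비용 합
--                 move_cost += sparse_table[idx][node_1][1]
--                 # 노드 이동
--                 node_1 = sparse_table[idx][node_1][0]
--     # depth_2 가 더 크면
--     elif depth_1 < depth_2:
--         # 깊이 상태
--         depth_state = 2
--         # 깊이 차이
--         sub_depth = depth_2 - depth_1
--         # 깊이 차이 2진수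
--         bin_sub_depth = bin(sub_depth)[2:]
--         # 순회하며 노드 이동
--         for idx, n in enumerate(reversed(bin_sub_depth)):
--             # n 이 1 이면
--             if n == '1':
--                 # 이동 비용 합
--                 move_cost += sparse_table[idx][node_2][1]
--                 # 노드 이동
--                 node_2 = sparse_table[idx][node_2][0]
--     return node_1, node_2, move_cost
-- ===== SOURCE B (Python) =====
-- def _climb(node, diff, sparse_table):
--     # level-by-level ascent: one parent edge (sparse_table[0]) at a time
--     parents = sparse_table[0]
--     cost = 0
--     while diff > 0:
--         cost += parents[node][1]
--         node = parents[node][0]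
--         diff -= 1
--     return node, cost
--
--
-- def equailze_depth(node_1, node_2, depth_list, sparse_table):
--     depth_1 = depth_list[node_1]
--     depth_2 = depth_list[node_2]
--     if depth_1 == depth_2:
--         return node_1, node_2, 0
--     if depth_1 > depth_2:
--         node_1, move_cost = _climb(node_1, depth_1 - depth_2, sparse_table)
--     else:
--         node_2, move_cost = _climb(node_2, depth_2 - depth_1, sparse_table)
--     return node_1, node_2, move_cost
-- ===== Notes on version B (the rewrite author's own statement) =====
-- stated objective: alternative
-- what changed: B replaces A's binary-lifting loop over the bits of bin(depth difference) (jumping 2^idx levels via sparse_table[idx]) with a naive level-by-level climb that follows the immediate-parent row sparse_table[0] once per level, summing single-edge costs; equal on real binary-lifting tables, which Pre_ states.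
-- outside the precondition, e.g. on equailze_depth(0, 1, [2, 0], [[(0, 1), (0, 0)], [(1, 7), (1, 7)]]): A returns (1, 1, 7), B returns (0, 1, 2); on equailze_depth(0, 1, [1, 0], [[(1, 5), (9, 0)]]): A returns (1, 1, 5), B returns (1, 1, 5); on equailze_depth(-2, 1, [1, 0], [[(0, 3), (0, 0)]]): A returns (0, 1, 3), B returns (0, 1, 3)
import Mathlib
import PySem

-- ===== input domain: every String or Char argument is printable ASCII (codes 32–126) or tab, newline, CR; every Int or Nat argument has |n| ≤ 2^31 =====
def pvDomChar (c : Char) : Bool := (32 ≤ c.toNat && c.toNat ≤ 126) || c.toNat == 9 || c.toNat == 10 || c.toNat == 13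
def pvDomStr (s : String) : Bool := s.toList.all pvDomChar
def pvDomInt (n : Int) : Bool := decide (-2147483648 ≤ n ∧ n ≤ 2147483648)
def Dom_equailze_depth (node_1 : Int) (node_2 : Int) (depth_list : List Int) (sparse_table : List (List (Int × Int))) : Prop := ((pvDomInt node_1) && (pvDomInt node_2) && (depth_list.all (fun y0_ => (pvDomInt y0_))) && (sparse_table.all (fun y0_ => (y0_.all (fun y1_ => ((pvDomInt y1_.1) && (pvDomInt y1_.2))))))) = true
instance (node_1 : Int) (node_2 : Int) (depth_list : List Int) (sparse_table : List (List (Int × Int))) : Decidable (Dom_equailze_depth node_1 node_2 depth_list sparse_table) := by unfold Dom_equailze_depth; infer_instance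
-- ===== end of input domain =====

-- B replaces A's binary-lifting loop over the bits of bin(diff) with a naive level-by-level
-- climb along the immediate-parent row sparse_table[0] (objective: alternative, not faster).

-- ===== PORT A =====
-- one iteration of A's `for idx, n in enumerate(reversed(bin_sub_depth))` body; state = (node, move_cost)
def pvStepA (sparse_table : List (List (Int × Int))) (st : Int × Int) (p : Int × Char) : Int × Int :=
  if p.2 = '1' then
    match PySem.List.pyGet? sparse_table p.1 with
    | none => st            -- IndexError in Python (excluded by Pre_)
    | some row =>
      match PySem.List.pyGet? row st.1 with
      | none => st          -- IndexError in Python (excluded by Pre_)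
      | some e => (e.1, st.2 + e.2)
  else st

def equailze_depth (node_1 : Int) (node_2 : Int) (depth_list : List Int) (sparse_table : List (List (Int × Int))) : Int × Int × Int :=
  match PySem.List.pyGet? depth_list node_1, PySem.List.pyGet? depth_list node_2 with
  | some depth_1, some depth_2 =>
    if depth_1 > depth_2 then
      let sub_depth := depth_1 - depth_2
      let bin_sub_depth := (PySem.Str.slice (PySem.Int.pyBin sub_depth) (some 2) none).toList
      let r := (PySem.List.enumerate bin_sub_depth.reverse).foldl (pvStepA sparse_table) (node_1, 0)
      (r.1, node_2, r.2)
    else if depth_1 < depth_2 then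
      let sub_depth := depth_2 - depth_1
      let bin_sub_depth := (PySem.Str.slice (PySem.Int.pyBin sub_depth) (some 2) none).toList
      let r := (PySem.List.enumerate bin_sub_depth.reverse).foldl (pvStepA sparse_table) (node_2, 0)
      (node_1, r.1, r.2)
    else (node_1, node_2, 0)
  | _, _ => (node_1, node_2, 0)   -- IndexError in Python (excluded by Pre_)

-- ===== PORT B =====
-- B's `while diff > 0` climb, fuelled by diff (an exact transliteration: diff > 0 is diff.toNat > 0)
def pvClimb (parents : List (Int × Int)) : Nat → Int → Int → Int × Int
  | 0, node, cost => (node, cost)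
  | m + 1, node, cost =>
    match PySem.List.pyGet? parents node with
    | none => (node, cost)  -- IndexError in Python (excluded by Pre_)
    | some e => pvClimb parents m e.1 (cost + e.2)

def equailze_depth_alt (node_1 : Int) (node_2 : Int) (depth_list : List Int) (sparse_table : List (List (Int × Int))) : Int × Int × Int :=
  match PySem.List.pyGet? depth_list node_1 with
  | none => (node_1, node_2, 0)       -- IndexError in Python (excluded by Pre_)
  | some depth_1 =>
    match PySem.List.pyGet? depth_list node_2 with
    | none => (node_1, node_2, 0)     -- IndexError in Python (excluded by Pre_)
    | some depth_2 =>
      if depth_1 = depth_2 then (node_1, node_2, 0)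
      else
        match PySem.List.pyGet? sparse_table 0 with
        | none => (node_1, node_2, 0) -- IndexError in Python (excluded by Pre_)
        | some parents =>
          if depth_1 > depth_2 then
            let r := pvClimb parents (depth_1 - depth_2).toNat node_1 0
            (r.1, node_2, r.2)
          else
            let r := pvClimb parents (depth_2 - depth_1).toNat node_2 0
            (node_1, r.1, r.2)

-- ===== PRECONDITION & SPEC =====
-- every entry of `row` is a valid (nonnegative, in-range) node pointer, and the row covers all nodes
def pvGoodRow (n : Nat) (row : List (Int × Int)) : Bool :=
  row.length == n && row.all (fun e => decide (0 ≤ e.1 ∧ e.1 < (n : Int)))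

-- row r' is the composition of two r-jumps (the defining property of a binary-lifting sparse table)
def pvAdj (r r' : List (Int × Int)) : Bool :=
  (List.range r.length).all (fun j =>
    let e := r.getD j (0, 0)
    let e2 := r.getD e.1.toNat (0, 0)
    r'.getD j (0, 0) == (e2.1, e.2 + e2.2))

-- Pre_ excludes (a) inputs where A raises IndexError, and (b) inputs on which A returns but the
-- sparse table is not an actual binary-lifting table of immediate parents (inconsistent rows,
-- invalid never-visited entries, or a negative deeper-node index): A's value there is an accident
-- of which levels its bit loop happens to touch, not a specified behaviour.
def Pre_equailze_depth (node_1 : Int) (node_2 : Int) (depth_list : List Int) (sparse_table : List (List (Int × Int))) : Prop :=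
  PySem.Raise.InRange depth_list.length node_1 ∧
  PySem.Raise.InRange depth_list.length node_2 ∧
  ((PySem.List.pyGet? depth_list node_1).getD 0 ≠ (PySem.List.pyGet? depth_list node_2).getD 0 →
     0 ≤ (if (PySem.List.pyGet? depth_list node_1).getD 0 > (PySem.List.pyGet? depth_list node_2).getD 0 then node_1 else node_2) ∧
     PySem.Int.bitLength ((PySem.List.pyGet? depth_list node_1).getD 0 - (PySem.List.pyGet? depth_list node_2).getD 0) ≤ sparse_table.length ∧
     (∀ k, k < PySem.Int.bitLength ((PySem.List.pyGet? depth_list node_1).getD 0 - (PySem.List.pyGet? depth_list node_2).getD 0) → pvGoodRow depth_list.length (sparse_table.getD k []) = true) ∧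
     (∀ k, k < PySem.Int.bitLength ((PySem.List.pyGet? depth_list node_1).getD 0 - (PySem.List.pyGet? depth_list node_2).getD 0) - 1 → pvAdj (sparse_table.getD k []) (sparse_table.getD (k + 1) []) = true))

instance (node_1 : Int) (node_2 : Int) (depth_list : List Int) (sparse_table : List (List (Int × Int))) : Decidable (Pre_equailze_depth node_1 node_2 depth_list sparse_table) := by unfold Pre_equailze_depth; infer_instance

def pvWitness_equailze_depth : Int × Int × List Int × (List (List (Int × Int))) :=
  (0, 1, [1, 0], [[(1, 5), (1, 0)]])

def Spec_equailze_depth (node_1 : Int) (node_2 : Int) (depth_list : List Int) (sparse_table : List (List (Int × Int))) (out : Int × Int × Int) : Prop := out = equailze_depth_alt node_1 node_2 depth_list sparse_table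
instance (node_1 : Int) (node_2 : Int) (depth_list : List Int) (sparse_table : List (List (Int × Int))) (out : Int × Int × Int) : Decidable (Spec_equailze_depth node_1 node_2 depth_list sparse_table out) := by unfold Spec_equailze_depth; infer_instance

-- ===== CLAIM (what is proved, stated in full; the proofs are below) =====
def Claim_equal_equailze_depth : Prop := ∀ (node_1 : Int) (node_2 : Int) (depth_list : List Int) (sparse_table : List (List (Int × Int))), Dom_equailze_depth node_1 node_2 depth_list sparse_table → Pre_equailze_depth node_1 node_2 depth_list sparse_table → Spec_equailze_depth node_1 node_2 depth_list sparse_table (equailze_depth node_1 node_2 depth_list sparse_table)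

-- ===== LEMMAS AND PROOFS =====

-- the single-edge jump both loops are built from: follow one table entry, adding its cost
def pstep (row : List (Int × Int)) (st : Int × Int) : Int × Int :=
  match PySem.List.pyGet? row st.1 with
  | none => st
  | some e => (e.1, st.2 + e.2)

-- the node component stays a valid index
def pvInv (n : Nat) (st : Int × Int) : Prop := 0 ≤ st.1 ∧ st.1 < (n : Int)

-- binary digits of n, LOW bit first (n ≥ 1)
def digLF (n : Nat) : List Char :=
  if n < 2 then [Nat.digitChar (n % 2)]
  else Nat.digitChar (n % 2) :: digLF (n / 2)
decreasing_by omega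

-- the value a low-first digit string denotes
def pvVal (bs : List Char) : Nat :=
  bs.foldr (fun ch acc => (if ch = '1' then 1 else 0) + 2 * acc) 0

theorem toDigitsCore_eq (f : Nat) : ∀ (m : Nat) (acc : List Char), 0 < m → m < 2 ^ f →
    Nat.toDigitsCore 2 f m acc = (digLF m).reverse ++ acc := by
  induction f with
  | zero => intro m acc h1 h2; omega
  | succ f ih =>
    intro m acc h1 h2
    have hpow : 2 ^ (f + 1) = 2 * 2 ^ f := by rw [pow_succ]; ring
    rw [Nat.toDigitsCore, digLF]
    by_cases hm : m / 2 = 0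
    · rw [if_pos hm, if_pos (show m < 2 by omega)]
      simp
    · rw [if_neg hm, if_neg (show ¬ m < 2 by omega)]
      rw [ih (m / 2) _ (by omega) (by omega)]
      simp

theorem toDigits_eq (m : Nat) (h : 0 < m) : (Nat.toDigits 2 m).reverse = digLF m := by
  unfold Nat.toDigits
  rw [toDigitsCore_eq (m + 1) m [] h (by exact Nat.lt_two_pow_self.trans_le (Nat.pow_le_pow_right (by omega) (by omega)))]
  simp

theorem val_digLF (m : Nat) (h : 0 < m) : pvVal (digLF m) = m := by
  induction m using Nat.strong_induction_on with
  | _ m ih =>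
    rw [digLF]
    by_cases hm : m < 2
    · rw [if_pos hm]
      have h1 : m = 1 := by omega
      subst h1
      decide
    · rw [if_neg hm]
      simp only [pvVal, List.foldr] at *
      rw [ih (m / 2) (by omega) (by omega)]
      rcases Nat.mod_two_eq_zero_or_one m with h2 | h2 <;> rw [h2]
      · rw [show Nat.digitChar 0 = '0' from rfl, if_neg (by decide)]
        omega
      · rw [show Nat.digitChar 1 = '1' from rfl, if_pos rfl]
        omega

theorem len_digLF (m : Nat) (h : 0 < m) : (digLF m).length = PySem.Int.bitLength (m : Int) := by
  induction m using Nat.strong_induction_on with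
  | _ m ih =>
    rw [digLF]
    by_cases hm : m < 2
    · rw [if_pos hm]
      have h1 : m = 1 := by omega
      subst h1
      simp only [List.length_singleton]
      decide
    · rw [if_neg hm]
      rw [PySem.Int.bitLength_of_pos (show (0:Int) < (m:Int) by exact_mod_cast h)]
      simp only [List.length_cons]
      rw [ih (m / 2) (by omega) (by omega)]
      rw [show PySem.Int.floordiv (m : Int) 2 = ((m / 2 : Nat) : Int) from by exact_mod_cast PySem.Int.floordiv_natCast m 2]

theorem goodRow_len {n : Nat} {row : List (Int × Int)} (h : pvGoodRow n row = true) : row.length = n := by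
  simp [pvGoodRow] at h
  exact h.1

theorem goodRow_mem {n : Nat} {row : List (Int × Int)} (h : pvGoodRow n row = true)
    {e : Int × Int} (he : e ∈ row) : 0 ≤ e.1 ∧ e.1 < (n : Int) := by
  obtain ⟨a, b⟩ := e
  simp [pvGoodRow, List.all_eq_true] at h
  exact h.2 a b he

theorem pyGet?_isSome_of_inRange {α : Type} (xs : List α) {i : Int}
    (h : PySem.Raise.InRange xs.length i) : ∃ x, PySem.List.pyGet? xs i = some x := by
  obtain ⟨h1, h2⟩ := h
  by_cases h0 : 0 ≤ i
  · exact ⟨_, PySem.List.pyGet?_eq_some_getElem xs h0 h2⟩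
  · unfold PySem.List.pyGet? PySem.List.pyIdx?
    rw [if_neg h0, if_pos h1]
    have hlt : xs.length - (-i).toNat < xs.length := by omega
    exact ⟨xs[xs.length - (-i).toNat], by simp [List.getElem?_eq_getElem hlt]⟩

theorem pstep_eq {n : Nat} {row : List (Int × Int)} {st : Int × Int}
    (hrow : pvGoodRow n row = true) (h : pvInv n st) :
    pstep row st = ((row.getD st.1.toNat (0, 0)).1, st.2 + (row.getD st.1.toNat (0, 0)).2) := by
  have hlen := goodRow_len hrow
  have h1 : st.1 < (row.length : Int) := by rw [hlen]; exact h.2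
  have hlt : st.1.toNat < row.length := by
    have := h.1
    omega
  unfold pstep
  rw [PySem.List.pyGet?_eq_some_getElem row h.1 h1, List.getD_eq_getElem _ _ hlt]

theorem pstep_inv {n : Nat} {row : List (Int × Int)} {st : Int × Int}
    (hrow : pvGoodRow n row = true) (h : pvInv n st) : pvInv n (pstep row st) := by
  rw [pstep_eq hrow h]
  have hlen := goodRow_len hrow
  have hlt : st.1.toNat < row.length := by
    have := h.1; have := h.2; omega
  have hmem : row.getD st.1.toNat (0, 0) ∈ row := by
    rw [List.getD_eq_getElem _ _ hlt]
    exact List.getElem_mem hlt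
  have hb := goodRow_mem hrow hmem
  exact ⟨hb.1, hb.2⟩

theorem iter_inv {n : Nat} {row : List (Int × Int)} (m : Nat) {st : Int × Int}
    (hrow : pvGoodRow n row = true) (h : pvInv n st) : pvInv n ((pstep row)^[m] st) := by
  induction m generalizing st with
  | zero => exact h
  | succ m ih =>
    rw [Function.iterate_succ_apply]
    exact ih (pstep_inv hrow h)

theorem adj_step {n : Nat} {r r' : List (Int × Int)} {st : Int × Int}
    (hr : pvGoodRow n r = true) (hr' : pvGoodRow n r' = true)
    (hadj : pvAdj r r' = true) (h : pvInv n st) :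
    pstep r' st = pstep r (pstep r st) := by
  have hlr := goodRow_len hr
  have hj : st.1.toNat < r.length := by
    have := h.1; have := h.2; omega
  simp only [pvAdj, List.all_eq_true, List.mem_range, beq_iff_eq] at hadj
  have haj := hadj st.1.toNat hj
  rw [pstep_eq hr' h, haj, pstep_eq hr (pstep_inv hr h), pstep_eq hr h]
  simp only [Prod.mk.injEq]
  exact ⟨trivial, by ring⟩

theorem jump_pow {n L : Nat} {t : List (List (Int × Int))}
    (hgood : ∀ k, k < L → pvGoodRow n (t.getD k []) = true)
    (hadj : ∀ k, k < L - 1 → pvAdj (t.getD k []) (t.getD (k + 1) []) = true)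
    (k : Nat) (hk : k < L) (st : Int × Int) (h : pvInv n st) :
    pstep (t.getD k []) st = (pstep (t.getD 0 []))^[2 ^ k] st := by
  induction k generalizing st with
  | zero => rw [pow_zero, Function.iterate_one]
  | succ k ih =>
    have h0 : 0 < L := by omega
    rw [adj_step (hgood k (by omega)) (hgood (k + 1) hk) (hadj k (by omega)) h]
    rw [ih (by omega) st h]
    rw [ih (by omega) _ (iter_inv _ (hgood 0 h0) h)]
    rw [← Function.iterate_add_apply]
    congr 1
    rw [pow_succ]
    ring

theorem pvStepA_one (t : List (List (Int × Int))) (st : Int × Int) (i : Int)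
    (row : List (Int × Int)) (hrow : PySem.List.pyGet? t i = some row) :
    pvStepA t st (i, '1') = pstep row st := by
  unfold pvStepA
  rw [if_pos rfl, hrow]
  rfl

theorem pvStepA_zero (t : List (List (Int × Int))) (st : Int × Int) (p : Int × Char)
    (h : ¬ p.2 = '1') : pvStepA t st p = st := by
  unfold pvStepA
  rw [if_neg h]

theorem foldA {n L : Nat} {t : List (List (Int × Int))}
    (hL : L ≤ t.length)
    (hgood : ∀ k, k < L → pvGoodRow n (t.getD k []) = true)
    (hadj : ∀ k, k < L - 1 → pvAdj (t.getD k []) (t.getD (k + 1) []) = true)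
    (bs : List Char) : ∀ (s : Nat) (st : Int × Int), s + bs.length ≤ L → pvInv n st →
    (PySem.List.enumerate bs (s : Int)).foldl (pvStepA t) st = (pstep (t.getD 0 []))^[pvVal bs * 2 ^ s] st := by
  induction bs with
  | nil =>
    intro s st _ _
    simp [PySem.List.enumerate, pvVal]
  | cons ch bs ih =>
    intro s st hs h
    have h0L : 0 < L := by simp at hs; omega
    rw [PySem.List.enumerate_cons, List.foldl_cons]
    have hcast : (s : Int) + 1 = ((s + 1 : Nat) : Int) := by push_cast; ring
    by_cases hch : ch = '1'
    · subst hch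
      have hsL : s < L := by simp at hs; omega
      have hst : (s : Int) < (t.length : Int) := by
        have hx : s < t.length := by omega
        exact_mod_cast hx
      have hget : PySem.List.pyGet? t (s : Int) = some (t.getD s []) := by
        rw [PySem.List.pyGet?_eq_some_getElem t (by positivity) hst]
        rw [List.getD_eq_getElem _ _ (show s < t.length by omega)]
        simp
      rw [pvStepA_one t st _ _ hget]
      rw [jump_pow hgood hadj s hsL st h]
      rw [hcast, ih (s + 1) _ (by simp at hs ⊢; omega) (iter_inv _ (hgood 0 h0L) h)]
      rw [← Function.iterate_add_apply]
      congr 1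
      simp [pvVal, pow_succ]
      ring
    · rw [pvStepA_zero t st _ (by simpa using hch)]
      rw [hcast, ih (s + 1) st (by simp at hs ⊢; omega) h]
      congr 1
      simp [pvVal, if_neg hch, pow_succ]
      ring

theorem climb_eq_iterate (parents : List (Int × Int)) (m : Nat) (node cost : Int) :
    pvClimb parents m node cost = (pstep parents)^[m] (node, cost) := by
  induction m generalizing node cost with
  | zero => rfl
  | succ m ih =>
    rw [Function.iterate_succ_apply]
    show (match PySem.List.pyGet? parents node with
      | none => (node, cost)
      | some e => pvClimb parents m e.1 (cost + e.2)) = _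
    cases hg : PySem.List.pyGet? parents node with
    | none =>
      have hfix : pstep parents (node, cost) = (node, cost) := by
        unfold pstep
        rw [hg]
      change (node, cost) = _
      rw [hfix, Function.iterate_fixed hfix]
    | some e =>
      have hstep : pstep parents (node, cost) = (e.1, cost + e.2) := by
        unfold pstep
        rw [hg]
      change pvClimb parents m e.1 (cost + e.2) = _
      rw [hstep, ih]

theorem binChars_eq (d : Int) (hd : 0 < d) :
    (PySem.Str.slice (PySem.Int.pyBin d) (some 2) none).toList = Nat.toDigits 2 d.toNat := by
  unfold PySem.Str.slice
  rw [String.toList_ofList]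
  unfold PySem.Chars.slice
  rw [PySem.List.slice_from _ (by norm_num : (0:Int) ≤ 2)]
  rw [PySem.Int.toList_pyBin]
  unfold PySem.Int.toBinChars0b
  rw [if_neg (by omega)]
  rfl

theorem branch_eq {dlen : Nat} {t : List (List (Int × Int))} (v d : Int) (hd : 0 < d)
    (hv0 : 0 ≤ v) (hvlt : v < (dlen : Int))
    (hL : PySem.Int.bitLength d ≤ t.length)
    (hgood : ∀ k, k < PySem.Int.bitLength d → pvGoodRow dlen (t.getD k []) = true)
    (hadj : ∀ k, k < PySem.Int.bitLength d - 1 → pvAdj (t.getD k []) (t.getD (k + 1) []) = true) :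
    (PySem.List.enumerate ((PySem.Str.slice (PySem.Int.pyBin d) (some 2) none).toList.reverse) 0).foldl (pvStepA t) (v, (0:Int))
      = pvClimb (t.getD 0 []) d.toNat v 0 := by
  have hdn : 0 < d.toNat := by omega
  have hcast : ((d.toNat : Nat) : Int) = d := Int.toNat_of_nonneg hd.le
  rw [binChars_eq d hd, toDigits_eq d.toNat hdn]
  have hlen : (digLF d.toNat).length = PySem.Int.bitLength d := by
    rw [len_digLF d.toNat hdn, hcast]
  have hfold := foldA hL hgood hadj (digLF d.toNat) 0 (v, (0:Int)) (by omega) ⟨hv0, hvlt⟩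
  rw [show ((0 : Nat) : Int) = (0 : Int) from rfl] at hfold
  rw [hfold, climb_eq_iterate]
  rw [val_digLF d.toNat hdn, pow_zero, mul_one]

-- ===== VERDICT (by name: the statement is the Claim_ definition above) =====
theorem equailze_depth_spec : Claim_equal_equailze_depth := by
  intro node_1 node_2 depth_list sparse_table _ hpre
  obtain ⟨hin1, hin2, hrest⟩ := hpre
  obtain ⟨d1, h1⟩ := pyGet?_isSome_of_inRange depth_list hin1
  obtain ⟨d2, h2⟩ := pyGet?_isSome_of_inRange depth_list hin2
  rw [h1, h2] at hrest
  simp only [Option.getD_some] at hrest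
  unfold Spec_equailze_depth equailze_depth equailze_depth_alt
  rw [h1, h2]
  dsimp only
  by_cases heq : d1 = d2
  · subst heq
    simp
  · obtain ⟨hv, hL, hgood, hadj⟩ := hrest heq
    rcases lt_or_gt_of_ne heq with hlt | hgt
    · -- depth_2 is larger: both climb node_2
      have hngt : ¬ d1 > d2 := by omega
      have hbl : PySem.Int.bitLength (d1 - d2) = PySem.Int.bitLength (d2 - d1) := by
        rw [show d1 - d2 = -(d2 - d1) by ring, PySem.Int.bitLength_neg]
      rw [hbl] at hL hgood hadj
      have hpos : 0 < PySem.Int.bitLength (d2 - d1) := by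
        rw [PySem.Int.bitLength_of_pos (by omega)]
        omega
      have ht0 : PySem.List.pyGet? sparse_table 0 = some (sparse_table.getD 0 []) := by
        rw [PySem.List.pyGet?_eq_some_getElem sparse_table (by norm_num)
          (by exact_mod_cast show 0 < sparse_table.length by omega)]
        rw [List.getD_eq_getElem _ _ (show 0 < sparse_table.length by omega)]
        rfl
      rw [if_neg hngt, if_pos hlt, if_neg heq, ht0]
      dsimp only
      rw [if_neg hngt]
      rw [if_neg hngt] at hv
      rw [branch_eq node_2 (d2 - d1) (by omega) hv hin2.2 hL hgood hadj]
    · -- depth_1 is larger: both climb node_1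
      have hgt' : d1 > d2 := hgt
      have hpos : 0 < PySem.Int.bitLength (d1 - d2) := by
        rw [PySem.Int.bitLength_of_pos (by omega)]
        omega
      have ht0 : PySem.List.pyGet? sparse_table 0 = some (sparse_table.getD 0 []) := by
        rw [PySem.List.pyGet?_eq_some_getElem sparse_table (by norm_num)
          (by exact_mod_cast show 0 < sparse_table.length by omega)]
        rw [List.getD_eq_getElem _ _ (show 0 < sparse_table.length by omega)]
        rfl
      rw [if_pos hgt', if_neg heq, ht0]
      dsimp only
      rw [if_pos hgt']
      rw [if_pos hgt'] at hv
      rw [branch_eq node_1 (d1 - d2) (by omega) hv hin1.2 hL hgood hadj]
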